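-- pv_equiv track=rewrite | github.com/Hussam9329/institute_web_system | trial_mode.py | _extract_base_table_name
-- ===== SOURCE A (Python) =====
-- TRIAL_ACCOUNTS = {
--     "raihany": {
--         "password": "12345",
--         "full_name": "حساب تجريبي - raihany",
--         "days": 5,
--     },
--     "athar": {
--         "password": "67890",
--         "full_name": "حساب تجريبي - athar",
--         "days": 5,
--     },
-- }
--
-- def _extract_base_table_name(trial_table: str) -> str:
--     """استخراج اسم الجدول الأساسي من اسم الجدول التجريبي.
--     trial_students → students (raihany قديم)
--     trial_athar_students → students (تسمية جديدة)
--     """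
--     # التسمية الجديدة: trial_{username}_{base}
--     for username in TRIAL_ACCOUNTS:
--         prefix = f"trial_{username}_"
--         if trial_table.startswith(prefix):
--             return trial_table[len(prefix):]
--     # التسمية القديمة: trial_{base}
--     if trial_table.startswith("trial_"):
--         return trial_table[6:]
--     return trial_table
-- ===== SOURCE B (Python) =====
-- TRIAL_ACCOUNTS = {
--     "raihany": {
--         "password": "12345",
--         "full_name": "حساب تجريبي - raihany",
--         "days": 5,
--     },
--     "athar": {
--         "password": "67890",
--         "full_name": "حساب تجريبي - athar",
--         "days": 5,
--     },
-- }
--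
-- def _extract_base_table_name(trial_table: str) -> str:
--     # Parse once: strip the "trial_" prefix, split off the first "_"-delimited
--     # token, and look it up in TRIAL_ACCOUNTS instead of scanning each
--     # candidate "trial_{username}_" prefix.
--     if not trial_table.startswith("trial_"):
--         return trial_table
--     rest = trial_table[6:]
--     parts = rest.split("_", 1)
--     if len(parts) == 2 and parts[0] in TRIAL_ACCOUNTS:
--         return parts[1]
--     return rest
-- ===== Notes on version B (the rewrite author's own statement) =====
-- stated objective: simpler
-- what changed: B strips the trial prefix once, splits the remainder at its first underscore and looks the head token up in TRIAL_ACCOUNTS, instead of A's loop testing one composed per-account prefix after another.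
import Mathlib
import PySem

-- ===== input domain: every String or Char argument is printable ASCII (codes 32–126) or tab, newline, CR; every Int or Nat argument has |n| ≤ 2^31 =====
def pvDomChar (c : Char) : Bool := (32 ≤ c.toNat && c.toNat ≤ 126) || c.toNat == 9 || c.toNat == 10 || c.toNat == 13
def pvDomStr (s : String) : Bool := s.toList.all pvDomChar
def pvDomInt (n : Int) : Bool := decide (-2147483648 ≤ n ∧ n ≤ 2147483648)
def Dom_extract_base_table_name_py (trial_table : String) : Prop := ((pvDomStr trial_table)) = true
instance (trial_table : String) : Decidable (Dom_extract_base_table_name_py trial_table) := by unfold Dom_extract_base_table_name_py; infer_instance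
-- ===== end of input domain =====

-- B replaces A's scan over per-account prefixes by one parse: strip the trial
-- prefix, split once at the first underscore, look the head up in TRIAL_ACCOUNTS (simpler).

-- ===== PORT A =====
-- the keys of TRIAL_ACCOUNTS, in insertion order
def pvTrialKeys : List String := ["raihany", "athar"]

-- the loop over TRIAL_ACCOUNTS keys: first matching prefix wins
def extract_base_table_name_py_loop : List String → String → Option String
  | [], _ => none
  | u :: us, t =>
    let p := "trial_" ++ u ++ "_"
    if PySem.Str.startswith t p then some (PySem.Str.slice t (some (PySem.Str.len p : Int)) none)
    else extract_base_table_name_py_loop us t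

def extract_base_table_name_py (trial_table : String) : String :=
  match extract_base_table_name_py_loop pvTrialKeys trial_table with
  | some r => r
  | none =>
    if PySem.Str.startswith trial_table "trial_" then PySem.Str.slice trial_table (some 6) none
    else trial_table

-- ===== PORT B =====
-- 'parts = rest.split("_", 1); return parts[1] if len==2 and parts[0] in TRIAL_ACCOUNTS else rest'
def pvB_core (rest : String) : String :=
  match PySem.Str.splitMax? rest "_" 1 with
  | some [head, tail] => if head ∈ pvTrialKeys then tail else rest
  | _ => rest

def extract_base_table_name_py_alt (trial_table : String) : String :=
  if ¬ PySem.Str.startswith trial_table "trial_" then trial_table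
  else pvB_core (PySem.Str.slice trial_table (some 6) none)

-- ===== PRECONDITION & SPEC =====
def Spec_extract_base_table_name_py (trial_table : String) (out : String) : Prop := out = extract_base_table_name_py_alt trial_table
instance (trial_table : String) (out : String) : Decidable (Spec_extract_base_table_name_py trial_table out) := by unfold Spec_extract_base_table_name_py; infer_instance

-- ===== CLAIM (what is proved, stated in full; the proofs are below) =====
def Claim_equal_extract_base_table_name_py : Prop := ∀ (trial_table : String), Dom_extract_base_table_name_py trial_table → Spec_extract_base_table_name_py trial_table (extract_base_table_name_py trial_table)

-- ===== LEMMAS AND PROOFS =====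

-- splitOnMax.go with maxsplit exhausted: the remainder is the last piece
lemma pv_go_m0 (fuel : Nat) (v : List Char) (acc : List (List Char)) :
    PySem.Chars.splitOnMax.go ['_'] fuel 0 v [] acc = (v :: acc).reverse := by
  cases fuel with
  | zero => simp [PySem.Chars.splitOnMax.go]
  | succ f => cases v <;> simp [PySem.Chars.splitOnMax.go]

-- a run with no separator: everything goes into the current piece
lemma pv_go_no (l : List Char) (cur : List Char) (acc : List (List Char)) (fuel : Nat)
    (hf : l.length < fuel) (hl : '_' ∉ l) :
    PySem.Chars.splitOnMax.go ['_'] fuel 1 l cur acc = ((cur.reverse ++ l) :: acc).reverse := by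
  induction l generalizing cur fuel with
  | nil =>
    cases fuel with
    | zero => omega
    | succ f => simp [PySem.Chars.splitOnMax.go]
  | cons c rest ih =>
    cases fuel with
    | zero => omega
    | succ f =>
      have hc : c ≠ '_' := fun h => hl (h ▸ List.mem_cons_self ..)
      have hrest : '_' ∉ rest := fun h => hl (List.mem_cons_of_mem _ h)
      simp only [PySem.Chars.splitOnMax.go, List.isPrefixOf,
        if_neg (by decide : ¬ (1:Nat) = 0)]
      rw [if_neg (show ¬(('_' == c && true) = true) by simp [Ne.symm hc])]
      rw [ih (c :: cur) f (by simpa using Nat.lt_of_succ_lt_succ hf) hrest]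
      simp

-- a run hitting the first separator: one split, then the rest is the last piece
lemma pv_go_sep (u v : List Char) (hu : '_' ∉ u) (cur : List Char) (acc : List (List Char))
    (fuel : Nat) (hf : (u ++ '_' :: v).length < fuel) :
    PySem.Chars.splitOnMax.go ['_'] fuel 1 (u ++ '_' :: v) cur acc
      = (v :: (cur.reverse ++ u) :: acc).reverse := by
  induction u generalizing cur fuel with
  | nil =>
    cases fuel with
    | zero => simp at hf
    | succ f =>
      simp only [List.nil_append, PySem.Chars.splitOnMax.go, List.isPrefixOf,
        if_neg (by decide : ¬ (1:Nat) = 0)]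
      rw [if_pos (show (('_' == '_' && true) = true) by decide)]
      simpa using pv_go_m0 f v (cur.reverse :: acc)
  | cons c rest ih =>
    cases fuel with
    | zero => simp at hf
    | succ f =>
      have hc : c ≠ '_' := fun h => hu (h ▸ List.mem_cons_self ..)
      have hrest : '_' ∉ rest := fun h => hu (List.mem_cons_of_mem _ h)
      simp only [List.cons_append, PySem.Chars.splitOnMax.go, List.isPrefixOf,
        if_neg (by decide : ¬ (1:Nat) = 0)]
      rw [if_neg (show ¬(('_' == c && true) = true) by simp [Ne.symm hc])]
      rw [ih hrest (c :: cur) f (by simp at hf ⊢; omega)]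
      simp

lemma pv_splitOnMax_no (l : List Char) (hl : '_' ∉ l) :
    PySem.Chars.splitOnMax l ['_'] 1 = [l] := by
  unfold PySem.Chars.splitOnMax
  rw [if_neg (by decide : ¬ (1:Int) < 0), show (1:Int).toNat = 1 from rfl]
  rw [pv_go_no l [] [] (l.length + 1) (Nat.lt_succ_self _) hl]
  simp

lemma pv_splitOnMax_sep (u v : List Char) (hu : '_' ∉ u) :
    PySem.Chars.splitOnMax (u ++ '_' :: v) ['_'] 1 = [u, v] := by
  unfold PySem.Chars.splitOnMax
  rw [if_neg (by decide : ¬ (1:Int) < 0), show (1:Int).toNat = 1 from rfl]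
  rw [pv_go_sep u v hu [] [] ((u ++ '_' :: v).length + 1) (Nat.lt_succ_self _)]
  simp

-- any '_'-containing list splits at its first '_'
lemma pv_split_first (R : List Char) (h : '_' ∈ R) :
    ∃ u v, R = u ++ '_' :: v ∧ '_' ∉ u := by
  induction R with
  | nil => cases h
  | cons c r ih =>
    by_cases hc : c = '_'
    · exact ⟨[], r, by simp [hc], by simp⟩
    · obtain ⟨u, v, h1, h2⟩ := ih (by
        rcases List.mem_cons.mp h with h | h
        · exact absurd h.symm hc
        · exact h)
      refine ⟨c :: u, v, by rw [h1]; rfl, ?_⟩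
      intro hm
      rcases List.mem_cons.mp hm with hm | hm
      · exact hc hm.symm
      · exact h2 hm

-- the first-'_' decomposition is unique
lemma pv_first_us (u v u' v' : List Char) (hu : '_' ∉ u) (hu' : '_' ∉ u')
    (h : u ++ '_' :: v = u' ++ '_' :: v') : u = u' ∧ v = v' := by
  induction u generalizing u' with
  | nil =>
    cases u' with
    | nil => simpa using h
    | cons c' r' =>
      simp only [List.nil_append, List.cons_append, List.cons.injEq] at h
      exact absurd (h.1 ▸ List.mem_cons_self ..) hu'
  | cons c r ih =>
    cases u' with
    | nil =>
      simp only [List.nil_append, List.cons_append, List.cons.injEq] at h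
      exact absurd (h.1 ▸ List.mem_cons_self ..) hu
    | cons c' r' =>
      simp only [List.cons_append, List.cons.injEq] at h
      obtain ⟨h1, h2⟩ := ih r' (fun hm => hu (List.mem_cons_of_mem _ hm))
        (fun hm => hu' (List.mem_cons_of_mem _ hm)) h.2
      exact ⟨by rw [h.1, h1], h2⟩

-- the keys of TRIAL_ACCOUNTS contain no '_'
lemma pv_no_us_raihany : '_' ∉ "raihany".toList := by decide
lemma pv_no_us_athar : '_' ∉ "athar".toList := by decide

-- A as three ordered prefix tests (loop over the two keys unfolded)
lemma pv_A_eq (t : String) :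
    extract_base_table_name_py t =
      if PySem.Str.startswith t "trial_raihany_" then PySem.Str.slice t (some 14) none
      else if PySem.Str.startswith t "trial_athar_" then PySem.Str.slice t (some 12) none
      else if PySem.Str.startswith t "trial_" then PySem.Str.slice t (some 6) none
      else t := by
  show (match extract_base_table_name_py_loop pvTrialKeys t with
        | some r => r
        | none => if PySem.Str.startswith t "trial_" then PySem.Str.slice t (some 6) none else t) = _
  simp only [pvTrialKeys, extract_base_table_name_py_loop, PySem.Str.startswith, PySem.Str.len]
  by_cases h1 : PySem.Chars.startswith t.toList ['t','r','i','a','l','_','r','a','i','h','a','n','y','_'] = true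
  · simp [h1]
  · by_cases h2 : PySem.Chars.startswith t.toList ['t','r','i','a','l','_','a','t','h','a','r','_'] = true
    · simp [h1, h2]
    · simp [h1, h2]

-- t[n:] on the char-list side
lemma pv_slice_toList (t : String) (n : Nat) :
    (PySem.Str.slice t (some (n : Int)) none).toList = t.toList.drop n := by
  simp [PySem.Str.slice, PySem.Chars.slice_eq_listSlice, PySem.List.slice_from_natCast]

-- ===== VERDICT (by name: the statement is the Claim_ definition above) =====
theorem extract_base_table_name_py_spec : Claim_equal_extract_base_table_name_py := by
  intro t _
  unfold Spec_extract_base_table_name_py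
  rw [pv_A_eq]
  by_cases h6 : PySem.Str.startswith t "trial_" = true
  · -- t = "trial_" ++ R on the char-list side
    obtain ⟨R, hRt⟩ : ∃ R, t.toList = "trial_".toList ++ R := by
      obtain ⟨r, hr⟩ := (PySem.Chars.startswith_iff t.toList "trial_".toList).mp
        (by simpa [PySem.Str.startswith] using h6)
      exact ⟨r, hr.symm⟩
    have hrest : (PySem.Str.slice t (some 6) none).toList = R := by
      rw [show ((6:Int)) = ((6:Nat):Int) from rfl, pv_slice_toList, hRt]; simp
    have hBalt : extract_base_table_name_py_alt t
        = pvB_core (PySem.Str.slice t (some 6) none) := by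
      unfold extract_base_table_name_py_alt
      rw [if_neg (not_not_intro h6)]
    rw [hBalt]
    -- A's long-prefix tests, read off R
    have c1 : (PySem.Str.startswith t "trial_raihany_" = true) ↔ "raihany_".toList <+: R := by
      simp only [PySem.Str.startswith, PySem.Chars.startswith_iff, hRt,
        show "trial_raihany_".toList = "trial_".toList ++ "raihany_".toList from rfl]
      exact List.prefix_append_right_inj _
    have c2 : (PySem.Str.startswith t "trial_athar_" = true) ↔ "athar_".toList <+: R := by
      simp only [PySem.Str.startswith, PySem.Chars.startswith_iff, hRt,
        show "trial_athar_".toList = "trial_".toList ++ "athar_".toList from rfl]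
      exact List.prefix_append_right_inj _
    by_cases hus : '_' ∈ R
    · obtain ⟨u, v, huv, hu⟩ := pv_split_first R hus
      have hsplitB : PySem.Str.splitMax? (PySem.Str.slice t (some 6) none) "_" 1
          = some [String.ofList u, String.ofList v] := by
        simp [PySem.Str.splitMax?, PySem.Chars.splitMax?, hrest, huv,
          show "_".toList = ['_'] from rfl, pv_splitOnMax_sep u v hu]
      have hBval : pvB_core (PySem.Str.slice t (some 6) none)
          = if String.ofList u ∈ pvTrialKeys then String.ofList v
            else PySem.Str.slice t (some 6) none := by
        unfold pvB_core; rw [hsplitB]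
      rw [hBval]
      by_cases hu1 : u = "raihany".toList
      · rw [if_pos (c1.mpr ⟨v, by rw [huv, hu1]; simp⟩)]
        rw [if_pos (show String.ofList u ∈ pvTrialKeys by
          rw [hu1, show String.ofList "raihany".toList = "raihany" from rfl]
          exact List.mem_cons_self ..)]
        apply String.toList_inj.mp
        rw [String.toList_ofList,
          show ((14:Int)) = ((14:Nat):Int) from rfl, pv_slice_toList, hRt, huv, hu1]
        simp
      · have h1 : ¬ PySem.Str.startswith t "trial_raihany_" = true := by
          intro h
          obtain ⟨w, hw⟩ := c1.mp h
          have : R = "raihany".toList ++ '_' :: w := by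
            rw [← hw]; simp
          exact hu1 (pv_first_us u v _ w hu pv_no_us_raihany (huv ▸ this)).1
        rw [if_neg h1]
        by_cases hu2 : u = "athar".toList
        · rw [if_pos (c2.mpr ⟨v, by rw [huv, hu2]; simp⟩)]
          rw [if_pos (show String.ofList u ∈ pvTrialKeys by
            rw [hu2, show String.ofList "athar".toList = "athar" from rfl]
            exact List.mem_cons_of_mem _ (List.mem_cons_self ..))]
          apply String.toList_inj.mp
          rw [String.toList_ofList,
            show ((12:Int)) = ((12:Nat):Int) from rfl, pv_slice_toList, hRt, huv, hu2]
          simp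
        · have h2 : ¬ PySem.Str.startswith t "trial_athar_" = true := by
            intro h
            obtain ⟨w, hw⟩ := c2.mp h
            have : R = "athar".toList ++ '_' :: w := by
              rw [← hw]; simp
            exact hu2 (pv_first_us u v _ w hu pv_no_us_athar (huv ▸ this)).1
          rw [if_neg h2, if_pos h6]
          rw [if_neg (show ¬ String.ofList u ∈ pvTrialKeys by
            intro hm
            simp only [pvTrialKeys, List.mem_cons, List.not_mem_nil, or_false] at hm
            rcases hm with hm | hm
            · exact hu1 (by rw [← hm, String.toList_ofList])
            · exact hu2 (by rw [← hm, String.toList_ofList]))]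
    · -- no '_' in R: the split yields one piece and the long prefixes all fail
      have hsplitB : PySem.Str.splitMax? (PySem.Str.slice t (some 6) none) "_" 1
          = some [String.ofList R] := by
        simp [PySem.Str.splitMax?, PySem.Chars.splitMax?, hrest,
          show "_".toList = ['_'] from rfl, pv_splitOnMax_no R hus]
      have hBval : pvB_core (PySem.Str.slice t (some 6) none)
          = PySem.Str.slice t (some 6) none := by
        unfold pvB_core; rw [hsplitB]
      rw [hBval]
      have h1 : ¬ PySem.Str.startswith t "trial_raihany_" = true := by
        intro h
        exact hus ((c1.mp h).subset (by decide))
      have h2 : ¬ PySem.Str.startswith t "trial_athar_" = true := by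
        intro h
        exact hus ((c2.mp h).subset (by decide))
      rw [if_neg h1, if_neg h2, if_pos h6]
  · -- not a trial table at all: both return it unchanged
    have hsub : ∀ (p : String), "trial_".toList <+: p.toList →
        ¬ PySem.Str.startswith t p = true := by
      intro p hpre h
      have h' := (PySem.Chars.startswith_iff t.toList p.toList).mp
        (by simpa [PySem.Str.startswith] using h)
      exact h6 (by
        simp only [PySem.Str.startswith]
        exact (PySem.Chars.startswith_iff _ _).mpr (hpre.trans h'))
    rw [if_neg (hsub "trial_raihany_" ⟨"raihany_".toList, rfl⟩),
        if_neg (hsub "trial_athar_" ⟨"athar_".toList, rfl⟩),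
        if_neg h6]
    unfold extract_base_table_name_py_alt
    rw [if_pos h6]
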